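-- pv_equiv track=rewrite | github.com/sunxxuns/aiter | hsa/gfx950/fmha_v3_fwd_fp8/tools/tr8_read_base_solver.py | build_write_bytes
-- ===== SOURCE A (Python) =====
-- from typing import Dict, Iterable, List, Set, Tuple
--
-- def bitop3(a: int, b: int, c: int, ttbl: int) -> int:
--     out = 0
--     for i in range(32):
--         s0 = (a >> i) & 1
--         s1 = (b >> i) & 1
--         s2 = (c >> i) & 1
--         idx = s0 | (s1 << 1) | (s2 << 2)
--         bit = (ttbl >> idx) & 1
--         out |= (bit << i)
--     return out & 0xFFFFFFFF
--
-- def write_base_bitop3(tid: int, c: int, ttbl: int) -> int: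
--     v4 = (tid << 4) & 0xFFFFFFFF
--     v4 = bitop3(v4, tid, c, ttbl)
--     return v4 & 0xFFFFFFFF
--
-- def build_write_bytes(v_lds0: int, write_c: int, write_ttbl: int) -> Set[int]:
--     w: Set[int] = set()
--     for tid in range(256):
--         b = v_lds0 + write_base_bitop3(tid, write_c, write_ttbl)  # preload uses tid, not lane
--         for i in range(16):
--             w.add(b + i)
--             w.add(b + 4096 + i)
--     return w
-- ===== SOURCE B (Python) =====
-- # B: bitop3 as a bit-parallel truth-table accumulation over the 8 LUT entries
-- # (32 masked-word operations) instead of A's per-bit scan over 32 bit positions;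
-- # the address set is built from one flat comprehension instead of nested add calls.
--
-- def bitop3_lut(a: int, b: int, c: int, ttbl: int) -> int:
--     M = 0xFFFFFFFF
--     a &= M
--     b &= M
--     c &= M
--     out = 0
--     for idx in range(8):
--         if (ttbl >> idx) & 1:
--             out |= ((a if idx & 1 else a ^ M)
--                     & (b if idx & 2 else b ^ M)
--                     & (c if idx & 4 else c ^ M))
--     return out
--
-- def write_base_lut(tid: int, c: int, ttbl: int) -> int:
--     return bitop3_lut((tid << 4) & 0xFFFFFFFF, tid, c, ttbl)
--
-- def build_write_bytes(v_lds0, write_c, write_ttbl):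
--     addrs = [v_lds0 + write_base_lut(tid, write_c, write_ttbl) + off + i
--              for tid in range(256)
--              for i in range(16)
--              for off in (0, 4096)]
--     return set(addrs)
-- ===== Notes on version B (the rewrite author's own statement) =====
-- stated objective: alternative
-- what changed: bitop3 is re-done as a bit-parallel LUT accumulation: instead of scanning the 32 bit positions and assembling the output bit by bit, B loops over the 8 truth-table entries and ORs in the whole 32-bit minterm mask (a/~a & b/~b & c/~c) for each set table bit; the address set is built from one flat comprehension fed to set() instead of incremental adds.
import Mathlib
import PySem

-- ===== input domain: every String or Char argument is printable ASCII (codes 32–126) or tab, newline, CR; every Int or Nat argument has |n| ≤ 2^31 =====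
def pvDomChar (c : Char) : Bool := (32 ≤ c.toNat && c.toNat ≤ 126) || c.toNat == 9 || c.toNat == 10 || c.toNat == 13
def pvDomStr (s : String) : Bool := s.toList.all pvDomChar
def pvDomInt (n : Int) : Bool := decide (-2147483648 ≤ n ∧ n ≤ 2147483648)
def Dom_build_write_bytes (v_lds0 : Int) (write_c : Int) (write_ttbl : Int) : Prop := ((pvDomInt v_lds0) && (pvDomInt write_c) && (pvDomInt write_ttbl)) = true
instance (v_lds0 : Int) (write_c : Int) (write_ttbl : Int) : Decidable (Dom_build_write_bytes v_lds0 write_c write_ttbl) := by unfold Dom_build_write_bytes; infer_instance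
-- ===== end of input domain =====

-- B re-does bitop3 as a bit-parallel truth-table accumulation over the 8 LUT entries
-- (whole-word minterm masks) instead of A's per-bit scan over 32 bit positions, and
-- builds the address set from one flat comprehension; proved equal to A on all inputs.

-- ===== PORT A =====
-- Shift amounts use `.toNat`: in A every shift count (loop index of range(32), idx built
-- from three 0/1 bits) is a nonnegative int, so this is exact.
def pvBitop3 (a : Int) (b : Int) (c : Int) (ttbl : Int) : Int :=
  let out :=
    (PySem.List.pyRange 0 32 1).foldl (fun out i =>
      let s0 := PySem.Int.band (a >>> i.toNat) 1
      let s1 := PySem.Int.band (b >>> i.toNat) 1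
      let s2 := PySem.Int.band (c >>> i.toNat) 1
      let idx := PySem.Int.bor (PySem.Int.bor s0 (s1 <<< 1)) (s2 <<< 2)
      let bit := PySem.Int.band (ttbl >>> idx.toNat) 1
      PySem.Int.bor out (bit <<< i.toNat)) 0
  PySem.Int.band out 0xFFFFFFFF

def pvWriteBaseBitop3 (tid : Int) (c : Int) (ttbl : Int) : Int :=
  let v4 := PySem.Int.band (tid <<< 4) 0xFFFFFFFF
  let v4 := pvBitop3 v4 tid c ttbl
  PySem.Int.band v4 0xFFFFFFFF

def build_write_bytes (v_lds0 : Int) (write_c : Int) (write_ttbl : Int) : List Int :=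
  (PySem.List.pyRange 0 256 1).foldl (fun w tid =>
    let b := v_lds0 + pvWriteBaseBitop3 tid write_c write_ttbl
    (PySem.List.pyRange 0 16 1).foldl (fun w i =>
      PySem.Set.add (PySem.Set.add w (b + i)) (b + 4096 + i)) w)
    PySem.Set.empty

-- ===== PORT B =====
def pvBitop3Lut (a : Int) (b : Int) (c : Int) (ttbl : Int) : Int :=
  let M : Int := 0xFFFFFFFF
  let a := PySem.Int.band a M
  let b := PySem.Int.band b M
  let c := PySem.Int.band c M
  (PySem.List.pyRange 0 8 1).foldl (fun out idx =>
    if PySem.Int.band (ttbl >>> idx.toNat) 1 ≠ 0 then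
      PySem.Int.bor out
        (PySem.Int.band
          (PySem.Int.band
            (if PySem.Int.band idx 1 ≠ 0 then a else PySem.Int.bxor a M)
            (if PySem.Int.band idx 2 ≠ 0 then b else PySem.Int.bxor b M))
          (if PySem.Int.band idx 4 ≠ 0 then c else PySem.Int.bxor c M))
    else out) 0

def pvWriteBaseLut (tid : Int) (c : Int) (ttbl : Int) : Int :=
  pvBitop3Lut (PySem.Int.band (tid <<< 4) 0xFFFFFFFF) tid c ttbl

def build_write_bytes_alt (v_lds0 : Int) (write_c : Int) (write_ttbl : Int) : List Int :=
  PySem.Set.ofList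
    ((PySem.List.pyRange 0 256 1).flatMap (fun tid =>
      (PySem.List.pyRange 0 16 1).flatMap (fun i =>
        ([0, 4096] : List Int).map (fun off =>
          v_lds0 + pvWriteBaseLut tid write_c write_ttbl + off + i))))

-- ===== PRECONDITION & SPEC =====
def Spec_build_write_bytes (v_lds0 : Int) (write_c : Int) (write_ttbl : Int) (out : List Int) : Prop := out = build_write_bytes_alt v_lds0 write_c write_ttbl
instance (v_lds0 : Int) (write_c : Int) (write_ttbl : Int) (out : List Int) : Decidable (Spec_build_write_bytes v_lds0 write_c write_ttbl out) := by unfold Spec_build_write_bytes; infer_instance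

-- ===== CLAIM (what is proved, stated in full; the proofs are below) =====
def Claim_equal_build_write_bytes : Prop := ∀ (v_lds0 : Int) (write_c : Int) (write_ttbl : Int), Dom_build_write_bytes v_lds0 write_c write_ttbl → Spec_build_write_bytes v_lds0 write_c write_ttbl (build_write_bytes v_lds0 write_c write_ttbl)

-- ===== LEMMAS AND PROOFS =====

-- disjoint addition is bitwise or
lemma pvAddOr : ∀ (m n : Nat), m &&& n = 0 → m + n = m ||| n := by
  intro m
  induction m using Nat.strong_induction_on with
  | _ m IH =>
    intro n h
    rcases Nat.eq_zero_or_pos m with hm | hm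
    · simp [hm]
    · have h2 : m / 2 &&& n / 2 = 0 := by rw [← Nat.and_div_two, h]
      have IH' := IH (m / 2) (by omega) (n / 2) h2
      have hb : (m.testBit 0 && n.testBit 0) = false := by
        rw [← Nat.testBit_and, h, Nat.zero_testBit]
      have hor0 : (m ||| n).testBit 0 = (m.testBit 0 || n.testBit 0) := Nat.testBit_or ..
      have hordiv : (m ||| n) / 2 = m / 2 ||| n / 2 := Nat.or_div_two
      rw [Nat.testBit_zero, Nat.testBit_zero] at hb
      rw [Nat.testBit_zero, Nat.testBit_zero, Nat.testBit_zero] at hor0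
      have hb' : ¬(m % 2 = 1 ∧ n % 2 = 1) := by
        intro ⟨h1, h2'⟩; simp [h1, h2'] at hb
      have hor' : ((m ||| n) % 2 = 1) ↔ (m % 2 = 1 ∨ n % 2 = 1) := by
        have hx : (decide (((m ||| n)) % 2 = 1) = true)
            ↔ ((decide (m % 2 = 1) || decide (n % 2 = 1)) = true) := by rw [hor0]
        simpa using hx
      omega

-- subtracting from an all-ones mask is xor with the mask
lemma pvNotLow (m : Nat) (h : m < 2 ^ 32) : (2 ^ 32 - 1) - m = (2 ^ 32 - 1) ^^^ m := by
  have hhi : ∀ j, ¬ j < 32 → m.testBit j = false := by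
    intro j hj
    exact Nat.testBit_lt_two_pow
      (lt_of_lt_of_le h (Nat.pow_le_pow_right (by norm_num) (by omega)))
  have hand : m &&& ((2 ^ 32 - 1) ^^^ m) = 0 := by
    apply Nat.eq_of_testBit_eq
    intro j
    simp only [Nat.testBit_and, Nat.testBit_xor, Nat.testBit_two_pow_sub_one, Nat.zero_testBit]
    by_cases hj : j < 32
    · simp only [hj, decide_true]
      cases m.testBit j <;> simp
    · simp [hhi j hj]
  have hor : m ||| ((2 ^ 32 - 1) ^^^ m) = 2 ^ 32 - 1 := by
    apply Nat.eq_of_testBit_eq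
    intro j
    simp only [Nat.testBit_or, Nat.testBit_xor, Nat.testBit_two_pow_sub_one]
    by_cases hj : j < 32
    · simp only [hj, decide_true]
      cases m.testBit j <;> simp
    · simp [hhi j hj, hj]
  have := pvAddOr m ((2 ^ 32 - 1) ^^^ m) hand
  omega

-- the Nat value of x & 0xFFFFFFFF (Python two's complement low 32 bits)
def pvMask (x : Int) : Nat :=
  match x with
  | .ofNat n => n % 2 ^ 32
  | .negSucc n => (2 ^ 32 - 1) ^^^ (n % 2 ^ 32)

lemma pvBand_M (x : Int) : PySem.Int.band x 0xFFFFFFFF = (↑(pvMask x) : Int) := by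
  have hM : ((0xFFFFFFFF : Int)).toNat = 2 ^ 32 - 1 := by
    rw [show ((0xFFFFFFFF : Int)).toNat = 4294967295 from rfl]; norm_num
  cases x with
  | ofNat n =>
    rw [show Int.ofNat n = (↑n : Int) from rfl,
      PySem.Int.band_of_nonneg (Int.natCast_nonneg n) (by norm_num),
      Int.toNat_natCast, hM, Nat.and_two_pow_sub_one_eq_mod]
    rfl
  | negSucc n =>
    have h1 : ¬ (0 : Int) ≤ Int.negSucc n := by
      simpa using Int.negSucc_lt_zero n
    simp only [PySem.Int.band, if_neg h1, if_pos (by norm_num : (0 : Int) ≤ 0xFFFFFFFF)]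
    have h2 : (-Int.negSucc n - 1).toNat = n := by rw [Int.neg_negSucc]; omega
    rw [h2, hM, Nat.and_comm, Nat.and_two_pow_sub_one_eq_mod,
      pvNotLow (n % 2 ^ 32) (Nat.mod_lt _ (by norm_num))]
    rfl

lemma pvMask_testBit (x : Int) (j : Nat) :
    (pvMask x).testBit j = (decide (j < 32) && x.testBit j) := by
  cases x with
  | ofNat n =>
    simp only [pvMask, Nat.testBit_mod_two_pow]
    rfl
  | negSucc n =>
    simp only [pvMask, Nat.testBit_xor, Nat.testBit_two_pow_sub_one,
      Nat.testBit_mod_two_pow, Int.testBit]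
    by_cases hj : j < 32 <;> cases hn : n.testBit j <;> simp [hj, hn]

lemma pvBit1 (x : Int) (i : Nat) :
    PySem.Int.band (x >>> i) 1 = (↑((cond (x.testBit i) 1 0 : Nat)) : Int) := by
  cases x with
  | ofNat n =>
    have hs : (Int.ofNat n) >>> i = ((↑(n >>> i)) : Int) := rfl
    rw [hs, PySem.Int.band_of_nonneg (Int.natCast_nonneg _) (by norm_num)]
    have ht : (Int.ofNat n).testBit i = n.testBit i := rfl
    rw [ht, Int.toNat_natCast,
      show ((1 : Int)).toNat = 1 from rfl, Nat.and_one_is_mod]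
    have hb : n.testBit i = decide ((n >>> i) % 2 = 1) := by
      rw [show n.testBit i = (n >>> i).testBit 0 by
        rw [Nat.testBit_shiftRight]; simp, Nat.testBit_zero]
    rw [hb]
    rcases Nat.mod_two_eq_zero_or_one (n >>> i) with h | h <;> simp [h]
  | negSucc n =>
    have hs : (Int.negSucc n) >>> i = Int.negSucc (n >>> i) := rfl
    have h1 : ¬ (0 : Int) ≤ Int.negSucc (n >>> i) := by
      simpa using Int.negSucc_lt_zero (n >>> i)
    rw [hs]
    simp only [PySem.Int.band, if_neg h1, if_pos (by norm_num : (0 : Int) ≤ 1)]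
    have h2 : (-Int.negSucc (n >>> i) - 1).toNat = n >>> i := by
      rw [Int.neg_negSucc]; omega
    rw [h2, show ((1 : Int)).toNat = 1 from rfl, Nat.and_comm, Nat.and_one_is_mod]
    have ht : (Int.negSucc n).testBit i = !(n.testBit i) := rfl
    have hb : n.testBit i = decide ((n >>> i) % 2 = 1) := by
      rw [show n.testBit i = (n >>> i).testBit 0 by
        rw [Nat.testBit_shiftRight]; simp, Nat.testBit_zero]
    rw [ht, hb]
    rcases Nat.mod_two_eq_zero_or_one (n >>> i) with h | h <;> simp [h]

-- generic: testBit of a fold of ors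
lemma pvFoldOrTestBit {α : Type} (h : α → Nat) (j : Nat) :
    ∀ (l : List α) (s : Nat),
      (l.foldl (fun o x => o ||| h x) s).testBit j
        = (s.testBit j || l.any fun x => (h x).testBit j) := by
  intro l
  induction l with
  | nil => simp
  | cons x xs IH =>
    intro s
    simp [IH, Nat.testBit_or, Bool.or_assoc]

-- generic: cast a foldl over a casted Nat range into Nat
lemma pvFoldCast (f : Int → Int → Int) (g : Nat → Nat → Nat)
    (hfg : ∀ (n k : Nat), f (↑n) (↑k) = ↑(g n k)) :
    ∀ (l : List Nat) (n : Nat),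
      (l.map (fun (k : Nat) => (k : Int))).foldl f (↑n) = ↑(l.foldl g n) := by
  intro l
  induction l with
  | nil => intro n; rfl
  | cons x xs IH =>
    intro n
    simp only [List.map_cons, List.foldl_cons]
    rw [hfg, IH]

lemma pvFoldCast0 (f : Int → Int → Int) (g : Nat → Nat → Nat)
    (hfg : ∀ (n k : Nat), f (↑n) (↑k) = ↑(g n k)) (l : List Nat) :
    (l.map (fun (k : Nat) => (k : Int))).foldl f 0 = ↑(l.foldl g 0) := by
  rw [show (0 : Int) = ((0 : Nat) : Int) from rfl]
  exact pvFoldCast f g hfg l 0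

lemma pvIdxEq (b0 b1 b2 : Bool) :
    (((cond b0 1 0 : Nat) ||| ((cond b1 1 0) <<< 1)) ||| ((cond b2 1 0) <<< 2))
      = (cond b0 1 0) + 2 * (cond b1 1 0) + 4 * (cond b2 1 0) := by
  cases b0 <;> cases b1 <;> cases b2 <;> decide

lemma pvShiftBit (bb : Bool) (i j : Nat) :
    ((cond bb 1 0 : Nat) <<< i).testBit j = (decide (i = j) && bb) := by
  cases bb
  · simp [Nat.zero_shiftLeft, Nat.zero_testBit]
  · rw [cond_true, Nat.one_shiftLeft, Nat.testBit_two_pow]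
    simp

lemma pvAnyRangeEq (N j : Nat) (hj : j < N) (T : Nat → Bool) :
    ((List.range N).any fun i => decide (i = j) && T i) = T j := by
  cases hT : T j
  · rw [List.any_eq_false]
    intro i hi
    by_cases hij : i = j
    · subst hij; simp [hT]
    · simp [hij]
  · rw [List.any_eq_true]
    exact ⟨j, List.mem_range.mpr hj, by simp [hT]⟩

lemma pvAnyRangeEq' (N j : Nat) (hj : j < N) (T : Nat → Bool) :
    ((List.range N).any fun i => T i && decide (i = j)) = T j := by
  rw [← pvAnyRangeEq N j hj T]
  congr 1
  funext i
  exact Bool.and_comm _ _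

def pvNatIdx (a b c : Int) (j : Nat) : Nat :=
  (cond (a.testBit j) 1 0) + 2 * (cond (b.testBit j) 1 0) + 4 * (cond (c.testBit j) 1 0)

def pvNatStepA (a b c t : Int) (n : Nat) (i : Nat) : Nat :=
  n ||| ((cond (t.testBit (pvNatIdx a b c i)) 1 0) <<< i)

def pvNatA (a b c t : Int) : Nat := (List.range 32).foldl (pvNatStepA a b c t) 0

def pvNatMt (A B C : Nat) (k : Nat) : Nat :=
  ((if k &&& 1 ≠ 0 then A else A ^^^ (2 ^ 32 - 1)) &&&
   (if k &&& 2 ≠ 0 then B else B ^^^ (2 ^ 32 - 1))) &&&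
  (if k &&& 4 ≠ 0 then C else C ^^^ (2 ^ 32 - 1))

def pvNatStepB (A B C : Nat) (t : Int) (n : Nat) (k : Nat) : Nat :=
  if t.testBit k then n ||| pvNatMt A B C k else n

def pvNatB (a b c t : Int) : Nat :=
  (List.range 8).foldl (pvNatStepB (pvMask a) (pvMask b) (pvMask c) t) 0

lemma pvCondShift1 (bb : Bool) : ((↑((cond bb 1 0 : Nat)) : Int)) <<< (1 : Int)
    = (↑((cond bb 1 0 : Nat) <<< 1) : Int) := by
  rw [show (1 : Int) = ((1 : Nat) : Int) from rfl, Int.shiftLeft_natCast]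

lemma pvCondShift2 (bb : Bool) : ((↑((cond bb 1 0 : Nat)) : Int)) <<< (2 : Int)
    = (↑((cond bb 1 0 : Nat) <<< 2) : Int) := by
  rw [show (2 : Int) = ((2 : Nat) : Int) from rfl, Int.shiftLeft_natCast]

lemma pvStepA_cast (a b c t : Int) (n k : Nat) :
    (fun (out i : Int) =>
      let s0 := PySem.Int.band (a >>> (↑i.toNat : Int)) 1
      let s1 := PySem.Int.band (b >>> (↑i.toNat : Int)) 1
      let s2 := PySem.Int.band (c >>> (↑i.toNat : Int)) 1
      let idx := PySem.Int.bor (PySem.Int.bor s0 (s1 <<< (1 : Int))) (s2 <<< (2 : Int))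
      let bit := PySem.Int.band (t >>> idx.toNat) 1
      PySem.Int.bor out (bit <<< (↑i.toNat : Int))) (↑n) (↑k)
      = (↑(pvNatStepA a b c t n k) : Int) := by
  dsimp only
  rw [Int.toNat_natCast]
  simp only [Int.shiftRight_natCast_right]
  rw [pvBit1 a k, pvBit1 b k, pvBit1 c k, pvCondShift1, pvCondShift2,
    PySem.Int.bor_natCast, PySem.Int.bor_natCast, pvIdxEq, Int.toNat_natCast,
    pvBit1 t _, Int.shiftLeft_natCast, PySem.Int.bor_natCast]
  rfl

lemma pvBitop3_eq_natA (a b c t : Int) :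
    pvBitop3 a b c t = ((pvNatA a b c t % 2 ^ 32 : Nat) : Int) := by
  unfold pvBitop3
  rw [show (32 : Int) = ((32 : Nat) : Int) by norm_num, PySem.List.pyRange_zero_natCast,
    pvFoldCast0 _ (pvNatStepA a b c t) (fun n k => pvStepA_cast a b c t n k) (List.range 32),
    pvBand_M]
  rfl

lemma pvFactorCast (p k q : Nat) (qi : Int) (hq : qi = (↑q : Int)) :
    (if PySem.Int.band (↑k) qi ≠ 0 then (↑p : Int) else PySem.Int.bxor (↑p) (0xFFFFFFFF : Int))
      = (↑(if k &&& q ≠ 0 then p else p ^^^ (2 ^ 32 - 1)) : Int) := by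
  subst hq
  rw [PySem.Int.band_natCast]
  by_cases h : k &&& q ≠ 0
  · rw [if_pos (by exact_mod_cast h), if_pos h]
  · rw [if_neg (by simpa using h), if_neg h,
      show (0xFFFFFFFF : Int) = ((4294967295 : Nat) : Int) from rfl, PySem.Int.bxor_natCast,
      show (4294967295 : Nat) = 2 ^ 32 - 1 by norm_num]

lemma pvStepB_cast (a b c t : Int) (n k : Nat) :
    (fun (out idx : Int) =>
      if PySem.Int.band (t >>> (↑idx.toNat : Int)) 1 ≠ 0 then
        PySem.Int.bor out
          (PySem.Int.band
            (PySem.Int.band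
              (if PySem.Int.band idx 1 ≠ 0 then (↑(pvMask a) : Int)
               else PySem.Int.bxor (↑(pvMask a)) (0xFFFFFFFF : Int))
              (if PySem.Int.band idx 2 ≠ 0 then (↑(pvMask b) : Int)
               else PySem.Int.bxor (↑(pvMask b)) (0xFFFFFFFF : Int)))
            (if PySem.Int.band idx 4 ≠ 0 then (↑(pvMask c) : Int)
             else PySem.Int.bxor (↑(pvMask c)) (0xFFFFFFFF : Int)))
      else out) (↑n) (↑k)
      = (↑(pvNatStepB (pvMask a) (pvMask b) (pvMask c) t n k) : Int) := by
  dsimp only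
  rw [Int.toNat_natCast]
  simp only [Int.shiftRight_natCast_right]
  rw [pvBit1 t k]
  unfold pvNatStepB
  cases hT : t.testBit k
  · simp
  · rw [cond_true]
    rw [if_pos (by simp : ¬ ((↑(1 : Nat) : Int) = 0)), if_pos rfl,
      pvFactorCast (pvMask a) k 1 (1 : Int) rfl,
      pvFactorCast (pvMask b) k 2 (2 : Int) rfl,
      pvFactorCast (pvMask c) k 4 (4 : Int) rfl,
      PySem.Int.band_natCast, PySem.Int.band_natCast, PySem.Int.bor_natCast]
    rfl

lemma pvBitop3Lut_eq_natB (a b c t : Int) :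
    pvBitop3Lut a b c t = (↑(pvNatB a b c t) : Int) := by
  unfold pvBitop3Lut
  dsimp only
  simp only [pvBand_M]
  rw [show (8 : Int) = ((8 : Nat) : Int) by norm_num, PySem.List.pyRange_zero_natCast,
    pvFoldCast0 _ (pvNatStepB (pvMask a) (pvMask b) (pvMask c) t)
      (fun n k => pvStepB_cast a b c t n k) (List.range 8)]
  rfl

lemma pvNatA_testBit (a b c t : Int) (j : Nat) :
    (pvNatA a b c t).testBit j = (decide (j < 32) && t.testBit (pvNatIdx a b c j)) := by
  have hshape : pvNatA a b c t
      = (List.range 32).foldl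
          (fun n i => n ||| ((cond (t.testBit (pvNatIdx a b c i)) 1 0) <<< i)) 0 := rfl
  rw [hshape,
    pvFoldOrTestBit (fun i => ((cond (t.testBit (pvNatIdx a b c i)) 1 0) <<< i)) j
      (List.range 32) 0]
  simp only [Nat.zero_testBit, Bool.false_or, pvShiftBit]
  by_cases hj : j < 32
  · rw [pvAnyRangeEq 32 j hj]
    simp [hj]
  · simp only [hj, decide_false, Bool.false_and]
    rw [List.any_eq_false]
    intro i hi
    have hij : ¬ (i = j) := by
      rintro rfl
      exact hj (List.mem_range.mp hi)
    simp [hij]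

lemma pvAnyCongrMem {l : List Nat} {p q : Nat → Bool} (h : ∀ a ∈ l, p a = q a) :
    l.any p = l.any q := by
  induction l with
  | nil => rfl
  | cons x xs IH =>
    simp only [List.any_cons]
    rw [h x (by simp), IH (fun a ha => h a (by simp [ha]))]

lemma pvStepB_or (A B C : Nat) (t : Int) (n k : Nat) :
    pvNatStepB A B C t n k = n ||| (if t.testBit k then pvNatMt A B C k else 0) := by
  cases h : t.testBit k <;> simp [pvNatStepB, h]

lemma pvFactor (x : Int) (q k j : Nat) :
    ((if k &&& q ≠ 0 then pvMask x else pvMask x ^^^ (2 ^ 32 - 1)) : Nat).testBit j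
      = (decide (j < 32) && (x.testBit j == decide (k &&& q ≠ 0))) := by
  by_cases h : k &&& q ≠ 0
  · rw [if_pos h, pvMask_testBit]
    simp [h]
  · rw [if_neg h, Nat.testBit_xor, pvMask_testBit, Nat.testBit_two_pow_sub_one]
    by_cases hj : j < 32 <;> cases hx : x.testBit j <;> simp [hj, hx, h]

lemma pvMt_testBit (a b c : Int) (k j : Nat) :
    (pvNatMt (pvMask a) (pvMask b) (pvMask c) k).testBit j
      = (decide (j < 32) &&
          ((a.testBit j == decide (k &&& 1 ≠ 0)) &&
           (b.testBit j == decide (k &&& 2 ≠ 0)) &&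
           (c.testBit j == decide (k &&& 4 ≠ 0)))) := by
  unfold pvNatMt
  rw [Nat.testBit_and, Nat.testBit_and, pvFactor, pvFactor, pvFactor]
  by_cases hj : j < 32
  · simp [hj, Bool.and_assoc]
  · simp [hj]

lemma pvIdxLookup : ∀ (x y z : Bool) (k : Nat), k < 8 →
    (((x == decide (k &&& 1 ≠ 0)) && (y == decide (k &&& 2 ≠ 0)) && (z == decide (k &&& 4 ≠ 0)))
      = decide (k = (cond x 1 0) + 2 * (cond y 1 0) + 4 * (cond z 1 0))) := by
  decide

lemma pvIdxLt (a b c : Int) (j : Nat) : pvNatIdx a b c j < 8 := by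
  unfold pvNatIdx
  cases a.testBit j <;> cases b.testBit j <;> cases c.testBit j <;> decide

lemma pvNatB_testBit (a b c t : Int) (j : Nat) :
    (pvNatB a b c t).testBit j = (decide (j < 32) && t.testBit (pvNatIdx a b c j)) := by
  have hshape : pvNatB a b c t
      = (List.range 8).foldl
          (fun n k => n ||| (if t.testBit k then pvNatMt (pvMask a) (pvMask b) (pvMask c) k else 0))
          0 := by
    unfold pvNatB
    rw [show pvNatStepB (pvMask a) (pvMask b) (pvMask c) t
        = fun n k => n ||| (if t.testBit k then pvNatMt (pvMask a) (pvMask b) (pvMask c) k else 0) by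
      funext n k
      exact pvStepB_or (pvMask a) (pvMask b) (pvMask c) t n k]
  rw [hshape,
    pvFoldOrTestBit
      (fun k => (if t.testBit k then pvNatMt (pvMask a) (pvMask b) (pvMask c) k else 0)) j
      (List.range 8) 0]
  simp only [Nat.zero_testBit, Bool.false_or]
  have helem : ∀ k, ((if t.testBit k then pvNatMt (pvMask a) (pvMask b) (pvMask c) k else 0).testBit j)
      = (t.testBit k && (pvNatMt (pvMask a) (pvMask b) (pvMask c) k).testBit j) := by
    intro k
    cases h : t.testBit k <;> simp [h, Nat.zero_testBit]
  simp only [helem, pvMt_testBit]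
  by_cases hj : j < 32
  · simp only [hj, decide_true, Bool.true_and]
    have hcongr : ((List.range 8).any fun k =>
        t.testBit k &&
          ((a.testBit j == decide (k &&& 1 ≠ 0)) &&
           (b.testBit j == decide (k &&& 2 ≠ 0)) &&
           (c.testBit j == decide (k &&& 4 ≠ 0))))
        = ((List.range 8).any fun k => t.testBit k && decide (k = pvNatIdx a b c j)) := by
      apply pvAnyCongrMem
      intro k hk
      rw [pvIdxLookup (a.testBit j) (b.testBit j) (c.testBit j) k (List.mem_range.mp hk)]
      rfl
    rw [hcongr, pvAnyRangeEq' 8 (pvNatIdx a b c j) (pvIdxLt a b c j)]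
  · simp [hj]

lemma pvBitop3_main (a b c t : Int) : pvBitop3 a b c t = pvBitop3Lut a b c t := by
  rw [pvBitop3_eq_natA, pvBitop3Lut_eq_natB]
  have hnat : pvNatA a b c t % 2 ^ 32 = pvNatB a b c t := by
    apply Nat.eq_of_testBit_eq
    intro j
    rw [Nat.testBit_mod_two_pow, pvNatA_testBit, pvNatB_testBit]
    by_cases hj : j < 32 <;> simp [hj]
  rw [hnat]

lemma pvWriteBase_main (tid c t : Int) :
    pvWriteBaseBitop3 tid c t = pvWriteBaseLut tid c t := by
  unfold pvWriteBaseBitop3 pvWriteBaseLut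
  dsimp only
  rw [pvBitop3_main, pvBitop3Lut_eq_natB, pvBand_M]
  have hnat : pvMask (↑(pvNatB (PySem.Int.band (tid <<< 4) 0xFFFFFFFF) tid c t))
      = pvNatB (PySem.Int.band (tid <<< 4) 0xFFFFFFFF) tid c t := by
    rw [show pvMask (↑(pvNatB (PySem.Int.band (tid <<< 4) 0xFFFFFFFF) tid c t))
        = pvNatB (PySem.Int.band (tid <<< 4) 0xFFFFFFFF) tid c t % 2 ^ 32 from rfl]
    apply Nat.eq_of_testBit_eq
    intro j
    rw [Nat.testBit_mod_two_pow, pvNatB_testBit]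
    by_cases hj : j < 32 <;> simp [hj]
  rw [hnat]

lemma pvInner (f g : Int → Int) :
    ∀ (l : List Int) (w : PySem.Set Int),
      l.foldl (fun w i => PySem.Set.add (PySem.Set.add w (f i)) (g i)) w
        = PySem.Set.update w (l.flatMap fun i => [f i, g i]) := by
  intro l
  induction l with
  | nil => intro w; rfl
  | cons x xs IH =>
    intro w
    rw [List.foldl_cons, IH, List.flatMap_cons]
    rfl

lemma pvUpdateAppend (w : PySem.Set Int) (xs ys : List Int) :
    PySem.Set.update w (xs ++ ys) = PySem.Set.update (PySem.Set.update w xs) ys := by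
  simp [PySem.Set.update, List.foldl_append]

lemma pvOuter (blk : Int → List Int) :
    ∀ (l : List Int) (w : PySem.Set Int),
      l.foldl (fun w t => PySem.Set.update w (blk t)) w
        = PySem.Set.update w (l.flatMap blk) := by
  intro l
  induction l with
  | nil => intro w; rfl
  | cons x xs IH =>
    intro w
    rw [List.foldl_cons, IH, List.flatMap_cons, pvUpdateAppend]

-- ===== VERDICT (by name: the statement is the Claim_ definition above) =====
theorem build_write_bytes_spec : Claim_equal_build_write_bytes := by
  intro v c t _h
  show build_write_bytes v c t = build_write_bytes_alt v c t
  unfold build_write_bytes build_write_bytes_alt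
  simp only [pvWriteBase_main, List.map_cons, List.map_nil, add_zero, pvInner, pvOuter,
    PySem.Set.ofList_eq_foldl]
  rfl
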